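-- pv_equiv track=rewrite | github.com/Balvarezpandozi/hw1 | freqnumber.py | count_instances_of_all_elements
-- ===== SOURCE A (Python) =====
-- compare_x_greater_or_equal_to_y = lambda x, y: x >= y
--
-- compare_x_equals_y = lambda x,y: x == y
--
-- compare_x_equals_0 = lambda x: x == 0
--
-- def count_instances_of_all_elements(list, index=0, counter=[]):
--     # Base case: list is empty
--     if compare_x_equals_0(len(list)):
--         return []
--     # Reached end of the list
--     if compare_x_greater_or_equal_to_y(index, len(list)):
--         return counter
--
--     occurrances = count_instances(list, list[index])
--     occurrances_counter = [list[index], occurrances]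
--     result = [occurrances_counter] + counter
--
--     return count_instances_of_all_elements(list, index+occurrances, result)
--
-- def count_instances(list, element, instances=0, index=0):
--     # If the index is at the end of the list, return the current instances of the number
--     if compare_x_equals_y(len(list), index):
--         return instances
--
--     # If the element is found, increment the create a new instances value to avoid mutation and call the function again
--     if compare_x_equals_y(element, list[index]):
--         new_instances = instances + 1
--         return count_instances(list, element, new_instances, index+1)
--     return count_instances(list,element, instances, index+1)
-- ===== SOURCE B (Python) =====
-- def count_instances_of_all_elements(list, index=0, counter=[]):
--     # iterative re-implementation: while-loop with list.count, same index-jumping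
--     if len(list) == 0:
--         return []
--     result = counter
--     i = index
--     while i < len(list):
--         occ = list.count(list[i])
--         result = [[list[i], occ]] + result
--         i += occ
--     return result
-- ===== Notes on version B (the rewrite author's own statement) =====
-- stated objective: simpler
-- what changed: Replaced the double recursion (top-level recursion carrying the counter plus a recursive per-element counting helper) by a single iterative while-loop that uses list.count for the per-element count.
import Mathlib
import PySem

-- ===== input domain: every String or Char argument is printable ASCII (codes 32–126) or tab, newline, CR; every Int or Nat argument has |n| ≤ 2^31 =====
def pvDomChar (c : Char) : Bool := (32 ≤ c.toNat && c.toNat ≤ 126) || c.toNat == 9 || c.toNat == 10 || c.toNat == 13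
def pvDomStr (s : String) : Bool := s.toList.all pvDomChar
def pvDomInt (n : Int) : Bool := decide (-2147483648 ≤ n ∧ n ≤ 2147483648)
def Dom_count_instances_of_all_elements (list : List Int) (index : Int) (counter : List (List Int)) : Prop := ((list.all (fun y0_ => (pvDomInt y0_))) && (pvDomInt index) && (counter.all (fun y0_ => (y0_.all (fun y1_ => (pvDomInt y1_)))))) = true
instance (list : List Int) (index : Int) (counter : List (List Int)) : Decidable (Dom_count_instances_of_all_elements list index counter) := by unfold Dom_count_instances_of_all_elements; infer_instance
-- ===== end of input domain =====

-- B replaces A's double recursion (top-level recursion + recursive counting helper) by one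
-- iterative while-loop using list.count; objective: simpler.
-- Both recursions are written with a structural fuel guard that only makes them total;
-- the fuel is always sufficient (index advances by ≥ 1 per step), so it never changes the value.

-- ===== PORT A =====
-- port of count_instances(list, element, instances=0, index=0); the 'none' branch is where
-- Python's list[index] would raise IndexError (never reached: A starts it at index 0)
def countInstGo (fuel : Nat) (l : List Int) (element : Int) (instances : Int) (index : Int) : Int :=
  match fuel with
  | 0 => instances
  | fuel + 1 =>
    if (l.length : Int) = index then instances
    else
      match PySem.List.pyGet? l index with
      | none => instances
      | some x =>
        if element = x then countInstGo fuel l element (instances + 1) (index + 1)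
        else countInstGo fuel l element instances (index + 1)

def countInst (l : List Int) (element : Int) (instances : Int) (index : Int) : Int :=
  countInstGo (l.length + 1) l element instances index

-- the body of count_instances_of_all_elements (A), fuel-guarded; the 'none' branch is where
-- Python's list[index] would raise IndexError (excluded by Pre_)
def aGo (fuel : Nat) (l : List Int) (index : Int) (counter : List (List Int)) : List (List Int) :=
  match fuel with
  | 0 => counter
  | fuel + 1 =>
    if (l.length : Int) = 0 then []
    else if index ≥ (l.length : Int) then counter
    else
      match PySem.List.pyGet? l index with
      | none => []
      | some v =>
        let occurrances := countInst l v 0 0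
        aGo fuel l (index + occurrances) ([[v, occurrances]] ++ counter)

def count_instances_of_all_elements (list : List Int) (index : Int) (counter : List (List Int)) : List (List Int) :=
  aGo (2 * list.length + 1) list index counter

-- ===== PORT B =====
-- the while-loop of Source B: result/i are the loop state; 'none' = Python IndexError (excluded by Pre_)
def altLoop (fuel : Nat) (l : List Int) (i : Int) (result : List (List Int)) : List (List Int) :=
  match fuel with
  | 0 => result
  | fuel + 1 =>
    if i < (l.length : Int) then
      match PySem.List.pyGet? l i with
      | none => []
      | some v =>
        altLoop fuel l (i + (PySem.List.count l v : Int)) ([[v, (PySem.List.count l v : Int)]] ++ result)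
    else result

def count_instances_of_all_elements_alt (list : List Int) (index : Int) (counter : List (List Int)) : List (List Int) :=
  if list.length = 0 then []
  else altLoop (2 * list.length + 1) list index counter

-- ===== PRECONDITION & SPEC =====
-- Pre_ excludes exactly the inputs where Python A raises IndexError: a nonempty list with
-- index < -len(list) (list[index] out of range); A returns normally everywhere else.
def Pre_count_instances_of_all_elements (list : List Int) (index : Int) (counter : List (List Int)) : Prop :=
  list = [] ∨ -(list.length : Int) ≤ index
instance (list : List Int) (index : Int) (counter : List (List Int)) : Decidable (Pre_count_instances_of_all_elements list index counter) := by unfold Pre_count_instances_of_all_elements; infer_instance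

def pvWitness_count_instances_of_all_elements : List Int × Int × List (List Int) := ([1, 2, 1], 0, [])

def Spec_count_instances_of_all_elements (list : List Int) (index : Int) (counter : List (List Int)) (out : List (List Int)) : Prop := out = count_instances_of_all_elements_alt list index counter
instance (list : List Int) (index : Int) (counter : List (List Int)) (out : List (List Int)) : Decidable (Spec_count_instances_of_all_elements list index counter out) := by unfold Spec_count_instances_of_all_elements; infer_instance

-- ===== CLAIM (what is proved, stated in full; the proofs are below) =====
def Claim_equal_count_instances_of_all_elements : Prop := ∀ (list : List Int) (index : Int) (counter : List (List Int)), Dom_count_instances_of_all_elements list index counter → Pre_count_instances_of_all_elements list index counter → Spec_count_instances_of_all_elements list index counter (count_instances_of_all_elements list index counter)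

-- ===== LEMMAS AND PROOFS =====

theorem countInstGo_spec (l : List Int) (e : Int) : ∀ (fuel : Nat) (inst : Int) (n : Nat),
    n ≤ l.length → l.length - n < fuel →
    countInstGo fuel l e inst (n : Int) = inst + ((l.drop n).count e : Int) := by
  intro fuel
  induction fuel with
  | zero => intro inst n _ hf; omega
  | succ fuel ih =>
    intro inst n hn hf
    rw [countInstGo]
    by_cases hend : n = l.length
    · subst hend
      simp
    · have hlt : n < l.length := by omega
      rw [if_neg (by exact_mod_cast fun hh => hend (by exact_mod_cast hh.symm))]
      have hg : PySem.List.pyGet? l (n : Int) = some l[n] := by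
        simp [PySem.List.pyGet?_natCast, List.getElem?_eq_getElem hlt]
      rw [hg]
      have hdrop : l.drop n = l[n] :: l.drop (n + 1) := (List.getElem_cons_drop hlt).symm
      have hcast : ((n : Int) + 1) = ((n + 1 : Nat) : Int) := by push_cast; ring
      split
      next heq => exact absurd heq (by simp)
      next x heq =>
        have hx : x = l[n] := (Option.some.inj heq).symm
        subst hx
        by_cases he : e = l[n]
        · rw [if_pos he, hcast, ih (inst + 1) (n + 1) (by omega) (by omega)]
          rw [hdrop, List.count_cons]
          simp [he]
          ring
        · rw [if_neg he, hcast, ih inst (n + 1) (by omega) (by omega)]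
          rw [hdrop, List.count_cons]
          simp [Ne.symm he]

theorem countInst_eq_count (l : List Int) (v : Int) :
    countInst l v 0 0 = (l.count v : Int) := by
  have h := countInstGo_spec l v (l.length + 1) 0 0 (Nat.zero_le _) (by omega)
  simpa [countInst] using h

theorem aGo_eq_altLoop (l : List Int) (hl : l ≠ []) : ∀ (fuel : Nat) (i : Int) (c : List (List Int)),
    aGo fuel l i c = altLoop fuel l i c := by
  intro fuel
  induction fuel with
  | zero => intro i c; rfl
  | succ fuel ih =>
    intro i c
    rw [aGo, altLoop]
    rw [if_neg (by simpa using hl)]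
    by_cases hi : i ≥ (l.length : Int)
    · rw [if_pos hi, if_neg (by omega)]
    · rw [if_neg hi, if_pos (by omega)]
      cases h : PySem.List.pyGet? l i with
      | none => rfl
      | some v =>
        have hocc : countInst l v 0 0 = (PySem.List.count l v : Int) := by
          rw [countInst_eq_count, PySem.List.count_eq]
        simp only [hocc]
        exact ih (i + (PySem.List.count l v : Int)) ([[v, (PySem.List.count l v : Int)]] ++ c)

-- ===== VERDICT (by name: the statement is the Claim_ definition above) =====
theorem count_instances_of_all_elements_spec : Claim_equal_count_instances_of_all_elements := by
  intro list index counter _ _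
  unfold Spec_count_instances_of_all_elements count_instances_of_all_elements count_instances_of_all_elements_alt
  by_cases hl : list = []
  · subst hl
    rw [aGo]
    simp
  · rw [if_neg (by simpa using hl)]
    exact aGo_eq_altLoop list hl (2 * list.length + 1) index counter
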